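-- pv_equiv track=rewrite | github.com/yumoxu/marge | src/scripts-unilm/build_mn_data_by_rank.py | get_len_token
-- ===== SOURCE A (Python) =====
-- def get_len_token(tgt_len):
--     if tgt_len < 100:
--         tgt_len = 85
--     elif tgt_len >= 400:
--         tgt_len = 400
--     else:
--         for start in range(100, 400, 15):
--             if start <= tgt_len < start+15:
--                 tgt_len = start
--                 break
--
--     assert (tgt_len-100)%15==0 or tgt_len==85, f'{tgt_len} is not right'
--     return f'[unused{tgt_len}]'
-- ===== SOURCE B (Python) =====
-- def get_len_token(tgt_len):
--     if tgt_len < 100: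
--         tgt_len = 85
--     elif tgt_len >= 400:
--         tgt_len = 400
--     else:
--         tgt_len = 100 + ((int(tgt_len) - 100) // 15) * 15
--     assert (tgt_len-100)%15==0 or tgt_len==85, f'{tgt_len} is not right'
--     return f'[unused{tgt_len}]'
-- ===== Notes on version B (the rewrite author's own statement) =====
-- stated objective: simpler
-- what changed: The linear scan over the bucket starts searching for the containing bucket is replaced by one floor-division formula that computes the bucket start directly.
import Mathlib
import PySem

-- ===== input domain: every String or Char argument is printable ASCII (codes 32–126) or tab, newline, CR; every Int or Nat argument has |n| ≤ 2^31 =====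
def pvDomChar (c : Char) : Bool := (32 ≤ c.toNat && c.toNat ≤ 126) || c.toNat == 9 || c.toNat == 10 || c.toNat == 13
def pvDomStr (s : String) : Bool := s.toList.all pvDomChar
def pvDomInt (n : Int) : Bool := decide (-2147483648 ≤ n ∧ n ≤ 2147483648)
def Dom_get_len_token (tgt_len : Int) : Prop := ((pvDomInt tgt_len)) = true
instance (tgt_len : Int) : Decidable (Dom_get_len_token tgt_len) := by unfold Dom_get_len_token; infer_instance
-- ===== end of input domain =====

-- B replaces A's linear scan over the 20 buckets by a single floor-division formula (objective: simpler).

-- ===== PORT A =====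
-- the for-loop with break: first start with start ≤ t < start+15 wins, else t unchanged
def pvLoopA : List Int → Int → Int
  | [], t => t
  | s :: rest, t => if s ≤ t ∧ t < s + 15 then s else pvLoopA rest t

def get_len_token (tgt_len : Int) : String :=
  let t :=
    if tgt_len < 100 then (85 : Int)
    else if tgt_len ≥ 400 then 400
    else pvLoopA (PySem.List.pyRange 100 400 15) tgt_len
  -- the assert always holds (t is 85, 400, or a bucket start), so it is a no-op
  "[unused" ++ PySem.Int.toStr t ++ "]"

-- ===== PORT B =====
def get_len_token_alt (tgt_len : Int) : String :=
  let t :=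
    if tgt_len < 100 then (85 : Int)
    else if tgt_len ≥ 400 then 400
    else 100 + PySem.Int.floordiv (tgt_len - 100) 15 * 15
  "[unused" ++ PySem.Int.toStr t ++ "]"

-- ===== PRECONDITION & SPEC =====
def Spec_get_len_token (tgt_len : Int) (out : String) : Prop := out = get_len_token_alt tgt_len
instance (tgt_len : Int) (out : String) : Decidable (Spec_get_len_token tgt_len out) := by unfold Spec_get_len_token; infer_instance

-- ===== CLAIM (what is proved, stated in full; the proofs are below) =====
def Claim_equal_get_len_token : Prop := ∀ (tgt_len : Int), Dom_get_len_token tgt_len → Spec_get_len_token tgt_len (get_len_token tgt_len)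

-- ===== LEMMAS AND PROOFS =====
-- the bucket starts 100, 115, … as an explicit recursive list, for the induction
def pvBuckets (a : Int) : Nat → List Int
  | 0 => []
  | n + 1 => a :: pvBuckets (a + 15) n

lemma pvLoopA_buckets (n : Nat) : ∀ (a t : Int), a ≤ t → t < a + 15 * n →
    pvLoopA (pvBuckets a n) t = a + (t - a) / 15 * 15 := by
  induction n with
  | zero => intro a t h1 h2; push_cast at h2; omega
  | succ n ih =>
    intro a t h1 h2
    rw [pvBuckets, pvLoopA]
    by_cases hc : a ≤ t ∧ t < a + 15
    · rw [if_pos hc]; omega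
    · rw [if_neg hc]
      rw [ih (a + 15) t (by omega) (by push_cast at h2 ⊢; omega)]
      omega

lemma pvLoopA_mid (t : Int) (h1 : 100 ≤ t) (h2 : t < 400) :
    pvLoopA (PySem.List.pyRange 100 400 15) t = 100 + PySem.Int.floordiv (t - 100) 15 * 15 := by
  have hr : PySem.List.pyRange 100 400 15 = pvBuckets 100 20 := by
    rw [PySem.List.pyRange_of_pos 100 400 (by norm_num)]
    norm_num
    decide
  rw [hr, PySem.Int.floordiv_eq_ediv_of_pos (by omega),
    pvLoopA_buckets 20 100 t h1 (by omega)]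

-- ===== VERDICT (by name: the statement is the Claim_ definition above) =====
theorem get_len_token_spec : Claim_equal_get_len_token := by
  intro t _
  unfold Spec_get_len_token get_len_token get_len_token_alt
  by_cases h1 : t < 100
  · simp [h1]
  · by_cases h2 : t ≥ 400
    · simp [h1, h2]
    · simp [h1, h2, pvLoopA_mid t (by omega) (by omega)]
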